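-- pv_equiv track=rewrite | github.com/ShreekarSeelavantula/major_c | app/services/syllabus_structurer.py | smart_split_topics
-- ===== SOURCE A (Python) =====
-- from typing import List
--
-- def smart_split_topics(text: str) -> List[str]:
--     """
--     Split comma-separated topics ONLY when they are truly independent.
--     """
--     raw_parts = [p.strip() for p in text.split(",")]
--
--     topics: List[str] = []
--     buffer = ""
--
--     for part in raw_parts:
--         if not part:
--             continue
--
--         # merge short or dependent fragments
--         if (
--             len(part.split()) <= 2
--             or " and " in part.lower()
--             or part.isupper()
--         ):
--             buffer = f"{buffer}, {part}" if buffer else part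
--         else:
--             if buffer:
--                 topics.append(buffer)
--                 buffer = ""
--             topics.append(part)
--
--     if buffer:
--         topics.append(buffer)
--
--     # final cleanup
--     return [t.strip() for t in topics if len(t.strip()) > 4]
-- ===== SOURCE B (Python) =====
-- from typing import List
--
-- def smart_split_topics(text: str) -> List[str]:
--     """
--     Same task, different decomposition: clean the parts first, then group
--     maximal runs of consecutive 'mergeable' fragments in one scan.
--     """
--     parts = [p for p in (q.strip() for q in text.split(",")) if p]
--
--     def mergeable(p: str) -> bool:
--         return len(p.split()) <= 2 or " and " in p.lower() or p.isupper()
--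
--     topics: List[str] = []
--     i = 0
--     n = len(parts)
--     while i < n:
--         j = i + 1
--         if mergeable(parts[i]):
--             while j < n and mergeable(parts[j]):
--                 j += 1
--             topics.append(", ".join(parts[i:j]))
--         else:
--             topics.append(parts[i])
--         i = j
--     return [t.strip() for t in topics if len(t.strip()) > 4]
-- ===== Notes on version B (the rewrite author's own statement) =====
-- stated objective: alternative
-- what changed: B first builds the cleaned list of non-empty stripped parts, then groups each maximal run of consecutive mergeable parts into one comma-space-joined topic in a single scan, instead of threading a buffer/flush state through the loop.
import Mathlib
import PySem

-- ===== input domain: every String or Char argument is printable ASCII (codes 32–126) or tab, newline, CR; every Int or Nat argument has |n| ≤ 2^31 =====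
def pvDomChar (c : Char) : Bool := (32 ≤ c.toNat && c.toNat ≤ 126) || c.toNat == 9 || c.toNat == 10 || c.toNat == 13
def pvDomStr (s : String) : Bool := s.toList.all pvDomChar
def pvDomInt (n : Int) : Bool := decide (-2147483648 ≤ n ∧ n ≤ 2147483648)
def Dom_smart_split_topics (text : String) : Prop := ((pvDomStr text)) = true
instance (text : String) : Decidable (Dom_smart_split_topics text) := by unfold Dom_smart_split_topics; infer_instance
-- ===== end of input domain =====

-- B drops empty parts first and then groups maximal runs of fragments the merge condition accepts in one scan,
-- instead of threading a buffer through the loop; same values, different decomposition (objective: alternative).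

-- shared helper: the merge condition both Pythons test
-- part.isupper(): exact on the ASCII domain (cased chars are exactly the letters): no lowercase
-- letter and at least one uppercase letter.
def pvIsupperStr (p : String) : Bool :=
  p.toList.all (fun c => !PySem.Chars.islower c) && p.toList.any PySem.Chars.isupper

def pvMergeable (p : String) : Bool :=
  decide ((PySem.Str.split₀ p).length ≤ 2) || PySem.Str.isIn " and " (PySem.Str.lower p) || pvIsupperStr p

-- ===== PORT A =====
-- A's loop body (one iteration of the for-loop) and the final flush of the buffer
def pvStep (st : List String × String) (part : String) : List String × String :=
  if part = "" then st
  else if pvMergeable part then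
    (st.1, if st.2 = "" then part else st.2 ++ ", " ++ part)
  else
    ((if st.2 = "" then st.1 else st.1 ++ [st.2]) ++ [part], "")

def pvFlush (st : List String × String) : List String :=
  if st.2 = "" then st.1 else st.1 ++ [st.2]

def smart_split_topics (text : String) : List String :=
  -- raw_parts: sep "," ≠ "" so split? is some
  ((pvFlush ((((PySem.Str.split? text ",").getD []).map PySem.Str.strip).foldl pvStep ([], ""))).filter
      (fun t => decide (4 < PySem.Str.len (PySem.Str.strip t)))).map PySem.Str.strip

-- ===== PORT B =====
-- the grouping scan: a maximal run of mergeable parts becomes one ", "-joined topic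
def pvGroup : List String → List String
  | [] => []
  | p :: ps =>
    if pvMergeable p then
      PySem.Str.join ", " (p :: ps.takeWhile pvMergeable) :: pvGroup (ps.dropWhile pvMergeable)
    else
      p :: pvGroup ps
termination_by l => l.length
decreasing_by
  · exact Nat.lt_succ_of_le (List.length_dropWhile_le _ _)
  · simp

def smart_split_topics_alt (text : String) : List String :=
  ((pvGroup ((((PySem.Str.split? text ",").getD []).map PySem.Str.strip).filter (fun p => p ≠ ""))).filter
      (fun t => decide (4 < PySem.Str.len (PySem.Str.strip t)))).map PySem.Str.strip

-- ===== PRECONDITION & SPEC =====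
def Spec_smart_split_topics (text : String) (out : List String) : Prop := out = smart_split_topics_alt text
instance (text : String) (out : List String) : Decidable (Spec_smart_split_topics text out) := by unfold Spec_smart_split_topics; infer_instance

-- ===== CLAIM (what is proved, stated in full; the proofs are below) =====
def Claim_equal_smart_split_topics : Prop := ∀ (text : String), Dom_smart_split_topics text → Spec_smart_split_topics text (smart_split_topics text)

-- ===== LEMMAS AND PROOFS =====

-- A's loop only skips empty parts, so folding over the raw list equals folding over the filtered one
lemma pvStep_skip_empty (l : List String) (st : List String × String) :
    l.foldl pvStep st = (l.filter (fun p => p ≠ "")).foldl pvStep st := by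
  induction l generalizing st with
  | nil => rfl
  | cons p ps ih =>
    by_cases hp : p = "" <;> simp [hp, pvStep, ih]

lemma pv_concat_ne (buf p : String) : buf ++ ", " ++ p ≠ "" := by
  intro h
  have := congrArg String.toList h
  simp at this

lemma pv_join_shift (a b : String) (l : List String) :
    PySem.Str.join ", " (a :: b :: l) = PySem.Str.join ", " ((a ++ ", " ++ b) :: l) := by
  apply String.toList_inj.mp
  cases l with
  | nil => simp [PySem.Str.toList_join, PySem.Chars.join_cons_cons, PySem.Chars.join_singleton]
  | cons c cs => simp [PySem.Str.toList_join, PySem.Chars.join_cons_cons]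

lemma pv_join_single (a : String) : PySem.Str.join ", " [a] = a := by
  apply String.toList_inj.mp
  simp [PySem.Str.toList_join, PySem.Chars.join_singleton]

-- the main loop invariant: A's buffer-threading fold, flushed, equals B's run-grouping
lemma pv_main (parts : List String) (hne : ∀ p ∈ parts, p ≠ "") (acc : List String) (buf : String) :
    pvFlush (parts.foldl pvStep (acc, buf)) =
      if buf = "" then acc ++ pvGroup parts
      else acc ++ (PySem.Str.join ", " (buf :: parts.takeWhile pvMergeable)
                    :: pvGroup (parts.dropWhile pvMergeable)) := by
  induction parts generalizing acc buf with
  | nil =>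
    by_cases hb : buf = "" <;> simp [hb, pvFlush, pvGroup, pv_join_single]
  | cons p ps ih =>
    have hp : p ≠ "" := hne p (by simp)
    have hne' : ∀ q ∈ ps, q ≠ "" := fun q hq => hne q (by simp [hq])
    by_cases hm : pvMergeable p
    · by_cases hb : buf = ""
      · rw [List.foldl_cons]
        simp only [pvStep, if_neg hp, if_pos hm, if_pos hb]
        rw [ih hne']
        simp [hp, pvGroup, hm]
      · rw [List.foldl_cons]
        simp only [pvStep, if_neg hp, if_pos hm, if_neg hb]
        rw [ih hne']
        simp only [if_neg (pv_concat_ne buf p)]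
        rw [List.takeWhile_cons_of_pos hm, List.dropWhile_cons_of_pos hm, pv_join_shift]
    · rw [List.foldl_cons]
      simp only [pvStep, if_neg hp, if_neg hm]
      by_cases hb : buf = ""
      · simp only [if_pos hb]
        rw [ih hne']
        simp [pvGroup, hm]
      · simp only [if_neg hb]
        rw [ih hne']
        rw [List.takeWhile_cons_of_neg hm, List.dropWhile_cons_of_neg hm]
        simp [pvGroup, hm, pv_join_single]

-- ===== VERDICT (by name: the statement is the Claim_ definition above) =====
theorem smart_split_topics_spec : Claim_equal_smart_split_topics := by
  intro text _
  unfold Spec_smart_split_topics smart_split_topics smart_split_topics_alt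
  have hfilt : ∀ p ∈ (((PySem.Str.split? text ",").getD []).map PySem.Str.strip).filter
      (fun p => p ≠ ""), p ≠ "" := by
    intro p hp
    simpa using (List.of_mem_filter hp)
  rw [pvStep_skip_empty, pv_main _ hfilt [] "" ]
  simp
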